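-- pv_equiv track=rewrite | github.com/minh-tech/Bitwise-Algorithms | Basic/Prob_28-swapBitsInPair.py | swapBitsInPair
-- ===== SOURCE A (Python) =====
-- def swapBitsInPair(x):
-- 	result = 0
-- 	i = 0
-- 	while x:
-- 		# Get 2 last bits
-- 		remain = x & 3
-- 		# If 2 last bits are 01 or 10, invert them.
-- 		if remain in (1, 2):
-- 			remain = remain ^ 3
--
-- 		# Append those bits in front of result
-- 		result = (remain << (2 * i)) | result
-- 		x = x >> 2
-- 		i += 1
-- 	return result
-- ===== SOURCE B (Python) =====
-- def swapBitsInPair(x):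
--     n = x.bit_length()
--     n += n & 1  # round up to an even number of bits
--     even = ((1 << n) - 1) // 3          # 0b0101...01 over n bits
--     return ((x & even) << 1) | ((x & (even << 1)) >> 1)
-- ===== Notes on version B (the rewrite author's own statement) =====
-- stated objective: idiomatic
-- what changed: Replaces the per-pair loop with whole-word mask arithmetic: an alternating mask sized to x.bit_length() selects even/odd bit positions and two shifts swap every pair at once.
import Mathlib
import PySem

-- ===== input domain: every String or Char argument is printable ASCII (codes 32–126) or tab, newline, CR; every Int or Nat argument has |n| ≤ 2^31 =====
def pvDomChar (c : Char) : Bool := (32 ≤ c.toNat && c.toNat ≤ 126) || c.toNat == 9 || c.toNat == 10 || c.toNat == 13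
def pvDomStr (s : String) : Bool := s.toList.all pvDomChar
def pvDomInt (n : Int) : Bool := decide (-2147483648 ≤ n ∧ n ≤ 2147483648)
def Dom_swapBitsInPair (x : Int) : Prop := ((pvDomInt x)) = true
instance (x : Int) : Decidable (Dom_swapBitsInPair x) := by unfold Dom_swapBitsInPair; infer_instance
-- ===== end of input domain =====

-- B swaps every adjacent bit pair with whole-word mask arithmetic (two shifts over an
-- alternating mask sized to x.bit_length()) instead of A's per-pair loop (idiomatic bit trick).

-- ===== PORT A =====
-- A's while loop, step for step, on the non-negative values Pre_ admits
-- (on x < 0 the Python loop never terminates, so those inputs lie outside Pre_).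
def swapLoopA (x i result : Nat) : Nat :=
  if x = 0 then result
  else
    let remain := x &&& 3
    let remain := if remain = 1 ∨ remain = 2 then remain ^^^ 3 else remain
    swapLoopA (x >>> 2) (i + 1) ((remain <<< (2 * i)) ||| result)
termination_by x
decreasing_by
  simp only [Nat.shiftRight_eq_div_pow]
  exact Nat.div_lt_self (by omega) (by norm_num)

def swapBitsInPair (x : Int) : Int :=
  -- totality guard: for x < 0 the Python loop diverges (outside Pre_)
  if x < 0 then 0 else (swapLoopA x.toNat 0 0 : Int)

-- ===== PORT B =====
def swapBitsInPair_alt (x : Int) : Int :=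
  let xn := x.toNat                       -- the non-negative domain (Pre_: 0 ≤ x)
  let n := Nat.size xn                    -- x.bit_length()
  let n := n + (n &&& 1)                  -- round up to an even number of bits
  let even := ((1 <<< n) - 1) / 3         -- 0b0101...01 over n bits
  (((xn &&& even) <<< 1) ||| ((xn &&& (even <<< 1)) >>> 1) : Nat)

-- ===== PRECONDITION & SPEC =====
-- Pre_ excludes x < 0: there A's 'while x: x = x >> 2' never terminates (no value is returned).
def Pre_swapBitsInPair (x : Int) : Prop := 0 ≤ x
instance (x : Int) : Decidable (Pre_swapBitsInPair x) := by unfold Pre_swapBitsInPair; infer_instance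
def pvWitness_swapBitsInPair : Int := (6)

def Spec_swapBitsInPair (x : Int) (out : Int) : Prop := out = swapBitsInPair_alt x
instance (x : Int) (out : Int) : Decidable (Spec_swapBitsInPair x out) := by unfold Spec_swapBitsInPair; infer_instance

-- ===== CLAIM (what is proved, stated in full; the proofs are below) =====
def Claim_equal_swapBitsInPair : Prop := ∀ (x : Int), Dom_swapBitsInPair x → Pre_swapBitsInPair x → Spec_swapBitsInPair x (swapBitsInPair x)

-- ===== LEMMAS AND PROOFS =====

-- the value A's loop accumulates, as a structural recursion (proof-side only)
def fA (x : Nat) : Nat :=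
  if x = 0 then 0
  else
    (let r := x &&& 3; if r = 1 ∨ r = 2 then r ^^^ 3 else r) ||| (fA (x >>> 2) <<< 2)
termination_by x
decreasing_by
  simp only [Nat.shiftRight_eq_div_pow]
  exact Nat.div_lt_self (by omega) (by norm_num)

theorem swapLoopA_eq (x : Nat) : ∀ i r, swapLoopA x i r = (fA x <<< (2 * i)) ||| r := by
  induction x using Nat.strong_induction_on with
  | _ x ih =>
    intro i r
    rw [swapLoopA, fA]
    by_cases hx : x = 0
    · simp [hx]
    · rw [if_neg hx, if_neg hx]
      rw [ih (x >>> 2) (by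
        simp only [Nat.shiftRight_eq_div_pow]
        exact Nat.div_lt_self (Nat.pos_of_ne_zero hx) (by norm_num))]
      rw [Nat.shiftLeft_or_distrib, ← Nat.shiftLeft_add]
      have he : 2 + 2 * i = 2 * (i + 1) := by ring
      rw [he, ← Nat.or_assoc,
        Nat.or_comm (fA (x >>> 2) <<< (2 * (i + 1)))]

-- testBit of the pair-swapped low chunk
theorem sw_testBit (x : Nat) :
    (let r := x &&& 3; if r = 1 ∨ r = 2 then r ^^^ 3 else r).testBit 0 = x.testBit 1 ∧
    (let r := x &&& 3; if r = 1 ∨ r = 2 then r ^^^ 3 else r).testBit 1 = x.testBit 0 ∧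
    ∀ j, 2 ≤ j → (let r := x &&& 3; if r = 1 ∨ r = 2 then r ^^^ 3 else r).testBit j = false := by
  have hr : x &&& 3 < 4 := Nat.lt_succ_of_le Nat.and_le_right
  have h0 : (x &&& 3).testBit 0 = x.testBit 0 := by
    rw [Nat.testBit_and, show Nat.testBit 3 0 = true from by decide, Bool.and_true]
  have h1 : (x &&& 3).testBit 1 = x.testBit 1 := by
    rw [Nat.testBit_and, show Nat.testBit 3 1 = true from by decide, Bool.and_true]
  have hsw : ∀ j, 2 ≤ j → ∀ v : Nat, v < 4 → v.testBit j = false := by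
    intro j hj v hv
    apply Nat.testBit_lt_two_pow
    calc v < 4 := hv
    _ = 2 ^ 2 := by norm_num
    _ ≤ 2 ^ j := Nat.pow_le_pow_right (by norm_num) hj
  show (if x &&& 3 = 1 ∨ x &&& 3 = 2 then (x &&& 3) ^^^ 3 else x &&& 3).testBit 0 = x.testBit 1 ∧
    (if x &&& 3 = 1 ∨ x &&& 3 = 2 then (x &&& 3) ^^^ 3 else x &&& 3).testBit 1 = x.testBit 0 ∧
    ∀ j, 2 ≤ j → (if x &&& 3 = 1 ∨ x &&& 3 = 2 then (x &&& 3) ^^^ 3 else x &&& 3).testBit j = false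
  have hcase : x &&& 3 = 0 ∨ x &&& 3 = 1 ∨ x &&& 3 = 2 ∨ x &&& 3 = 3 := by omega
  rcases hcase with h | h | h | h <;>
    rw [h] at h0 h1 <;>
    refine ⟨by rw [← h1, h]; decide, by rw [← h0, h]; decide, ?_⟩ <;>
    · intro j hj
      rw [h]
      exact hsw j hj _ (by decide)

theorem fA_testBit (x : Nat) : ∀ j, (fA x).testBit j = x.testBit (if j % 2 = 0 then j + 1 else j - 1) := by
  induction x using Nat.strong_induction_on with
  | _ x ih =>
    intro j
    rw [fA]
    by_cases hx : x = 0
    · simp [hx]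
    · rw [if_neg hx]
      obtain ⟨s0, s1, shigh⟩ := sw_testBit x
      rw [Nat.testBit_or, Nat.testBit_shiftLeft]
      match j with
      | 0 => simpa using s0
      | 1 => simpa using s1
      | (k + 2) =>
        rw [shigh (k + 2) (by omega)]
        have h2 : k + 2 - 2 = k := by omega
        rw [h2]
        have ihk := ih (x >>> 2) (by
          simp only [Nat.shiftRight_eq_div_pow]
          exact Nat.div_lt_self (Nat.pos_of_ne_zero hx) (by norm_num)) k
        simp only [Nat.testBit_shiftRight] at ihk
        rw [Bool.false_or, show decide (2 ≤ k + 2) = true from by simp, Bool.true_and, ihk]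
        by_cases hk : k % 2 = 0
        · rw [if_pos hk, if_pos (show (k + 2) % 2 = 0 by omega)]
          congr 1
          omega
        · rw [if_neg hk, if_neg (show ¬(k + 2) % 2 = 0 by omega)]
          congr 1
          omega

-- the alternating mask, bit by bit
theorem mask_testBit (m : Nat) : ∀ j, ((2 ^ (2 * m) - 1) / 3).testBit j = (decide (j % 2 = 0) && decide (j < 2 * m)) := by
  induction m with
  | zero => simp
  | succ m ih =>
    intro j
    have hmod : 2 ^ (2 * m) % 3 = 1 := by
      rw [pow_mul]
      norm_num [Nat.pow_mod]
    have hpos : 1 ≤ 2 ^ (2 * m) := Nat.one_le_two_pow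
    have hstep : 2 ^ (2 * (m + 1)) = 4 * 2 ^ (2 * m) := by ring
    set k := (2 ^ (2 * m) - 1) / 3 with hk
    have hkv : 2 ^ (2 * m) = 3 * k + 1 := by omega
    have hval : (2 ^ (2 * (m + 1)) - 1) / 3 = 4 * k + 1 := by omega
    rw [hval]
    match j with
    | 0 => simp [Nat.testBit_zero]; omega
    | 1 =>
      rw [Nat.testBit_succ]
      have : (4 * k + 1) / 2 = 2 * k := by omega
      rw [this]
      simp [Nat.testBit_zero]
    | (j + 2) =>
      rw [Nat.testBit_succ, Nat.testBit_succ]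
      have h2 : (4 * k + 1) / 2 = 2 * k := by omega
      have h3 : (2 * k) / 2 = k := by omega
      rw [h2, h3, ih j]
      have e1 : decide ((j + 2) % 2 = 0) = decide (j % 2 = 0) := decide_eq_decide.mpr (by omega)
      have e2 : decide (j + 2 < 2 * (m + 1)) = decide (j < 2 * m) := decide_eq_decide.mpr (by omega)
      rw [e1, e2]

theorem high_bit_false (x n j : Nat) (hx : x < 2 ^ n) (hj : n ≤ j) : x.testBit j = false := by
  apply Nat.testBit_lt_two_pow
  exact lt_of_lt_of_le hx (Nat.pow_le_pow_right (by norm_num) hj)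

-- B's whole-word expression, bit by bit: bit j of B's value is bit (j xor 1) of x
theorem alt_testBit (xn : Nat) (j : Nat) :
    (((xn &&& ((1 <<< (Nat.size xn + (Nat.size xn &&& 1))) - 1) / 3) <<< 1) |||
      ((xn &&& ((((1 <<< (Nat.size xn + (Nat.size xn &&& 1))) - 1) / 3) <<< 1)) >>> 1)).testBit j
    = xn.testBit (if j % 2 = 0 then j + 1 else j - 1) := by
  set s := Nat.size xn with hs
  have hn2 : s + (s &&& 1) = 2 * ((s + (s &&& 1)) / 2) := by
    have : s &&& 1 = s % 2 := Nat.and_one_is_mod s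
    omega
  set m := (s + (s &&& 1)) / 2 with hm
  have hmask : ∀ i, (((1 <<< (s + (s &&& 1))) - 1) / 3).testBit i = (decide (i % 2 = 0) && decide (i < 2 * m)) := by
    intro i
    rw [Nat.one_shiftLeft, hn2]
    exact mask_testBit m i
  have hhigh : ∀ i, 2 * m ≤ i → xn.testBit i = false := by
    intro i hi
    refine high_bit_false xn (2 * m) i ?_ hi
    have h1 : xn < 2 ^ s := Nat.lt_size_self xn
    have h2 : s ≤ 2 * m := by omega
    exact lt_of_lt_of_le h1 (Nat.pow_le_pow_right (by norm_num) h2)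
  rw [Nat.testBit_or, Nat.testBit_shiftLeft, Nat.testBit_shiftRight]
  rw [Nat.testBit_and, Nat.testBit_and, Nat.testBit_shiftLeft]
  by_cases hj : j % 2 = 0
  · rw [if_pos hj]
    have hfst : (decide (1 ≤ j) && (xn.testBit (j - 1) && ((((1 <<< (s + (s &&& 1))) - 1) / 3)).testBit (j - 1))) = false := by
      by_cases hj0 : j = 0
      · subst hj0
        simp
      · rw [hmask]
        have hodd : ¬((j - 1) % 2 = 0) := by omega
        simp [hodd]
    have hsnd : (decide (1 ≤ 1 + j) && ((((1 <<< (s + (s &&& 1))) - 1) / 3)).testBit (1 + j - 1)) = (decide (j < 2 * m)) := by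
      have h1j : 1 + j - 1 = j := by omega
      rw [h1j, hmask]
      simp [hj]
    rw [hfst, Bool.false_or, hsnd]
    by_cases hlt : j < 2 * m
    · simp only [hlt, decide_true, Bool.and_true]
      congr 1
      omega
    · simp only [hlt, decide_false, Bool.and_false]
      exact (hhigh (j + 1) (by omega)).symm
  · rw [if_neg hj]
    have h1j : 1 ≤ j := by omega
    have hsnd : ((((1 <<< (s + (s &&& 1))) - 1) / 3)).testBit (1 + j - 1) = false := by
      have : 1 + j - 1 = j := by omega
      rw [this, hmask]; simp [hj]
    rw [hsnd]
    simp only [Bool.and_false, Bool.or_false, h1j, decide_true, Bool.true_and]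
    rw [hmask]
    have hje : (j - 1) % 2 = 0 := by omega
    simp only [hje, decide_true, Bool.true_and]
    by_cases hlt : j - 1 < 2 * m
    · simp [hlt]
    · simp only [hlt, decide_false, Bool.and_false]
      rw [hhigh (j - 1) (by omega)]

-- ===== VERDICT (by name: the statement is the Claim_ definition above) =====
theorem swapBitsInPair_spec : Claim_equal_swapBitsInPair := by
  intro x _ hpre
  unfold Spec_swapBitsInPair swapBitsInPair swapBitsInPair_alt
  rw [if_neg (by exact not_lt.mpr hpre)]
  congr 1
  rw [swapLoopA_eq]
  simp only [Nat.mul_zero, Nat.shiftLeft_zero, Nat.or_zero]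
  apply Nat.eq_of_testBit_eq
  intro j
  rw [fA_testBit, alt_testBit]
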